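-- pv_equiv track=rewrite | github.com/xuwd11/Coursera-Bioinformatics | 63_01_PartialSuffixArray_Naive.py | sortDoubled
-- ===== SOURCE A (Python) =====
-- def sortDoubled(S, L, order, _class):
--     sLen = len(S)
--     count = [0] * sLen
--     newOrder = [0] * sLen
--     for i in range(sLen):
--         count[_class[i]] += 1
--     for j in range(1, sLen):
--         count[j] += count[j-1]
--     for i in range(sLen-1, -1, -1):
--         start = (order[i]-L+sLen) % sLen
--         cl = _class[start]
--         count[cl] -= 1
--         newOrder[count[cl]] = start
--     return newOrder
-- ===== SOURCE B (Python) =====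
-- def sortDoubled(S, L, order, _class):
--     # Counting sort reorganised around explicit bucket lists: collect the indices of
--     # each class into its bucket, give every bucket a slot range below its cumulative
--     # count, then apply the writes right to left as in the classic stable scatter.
--     n = len(S)
--     starts = [(order[i] - L + n) % n for i in range(n)]
--     hist = [0] * n
--     for i in range(n):
--         hist[_class[i]] += 1
--     cum = []
--     total = 0
--     for h in hist:
--         total += h
--         cum.append(total)
--     buckets = [[] for _ in range(n)]
--     for i in range(n):
--         buckets[_class[starts[i]]].append(i)
--     pos = [0] * n
--     for c in range(n):
--         p = cum[c] - len(buckets[c])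
--         for i in buckets[c]:
--             pos[i] = p
--             p += 1
--     result = [0] * n
--     for i in reversed(range(n)):
--         result[pos[i]] = starts[i]
--     return result
-- ===== Notes on version B (the rewrite author's own statement) =====
-- stated objective: alternative
-- what changed: Reorganises the counting sort around explicit per-class bucket lists: indices are collected into the bucket of their start's class, each bucket receives a contiguous slot range ending at its class's cumulative count, and the writes are applied in one final right-to-left pass, replacing A's in-place count-decrementing scatter.
import Mathlib
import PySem

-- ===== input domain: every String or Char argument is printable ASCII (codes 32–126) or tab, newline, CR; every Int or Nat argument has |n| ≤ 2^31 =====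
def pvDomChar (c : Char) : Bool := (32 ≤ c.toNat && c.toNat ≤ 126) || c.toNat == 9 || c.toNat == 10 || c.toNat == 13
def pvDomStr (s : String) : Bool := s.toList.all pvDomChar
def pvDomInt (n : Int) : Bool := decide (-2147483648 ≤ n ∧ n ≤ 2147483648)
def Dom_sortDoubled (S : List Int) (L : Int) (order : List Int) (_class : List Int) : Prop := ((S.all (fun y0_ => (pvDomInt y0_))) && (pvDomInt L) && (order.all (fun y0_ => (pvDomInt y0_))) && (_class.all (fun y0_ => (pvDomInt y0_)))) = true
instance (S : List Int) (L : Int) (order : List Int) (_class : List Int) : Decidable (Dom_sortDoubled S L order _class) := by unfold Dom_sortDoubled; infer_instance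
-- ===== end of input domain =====

-- B reorganises the counting sort around explicit per-class bucket lists with precomputed
-- slot ranges, applying the writes in one final right-to-left pass, instead of A's in-place
-- count-decrementing scatter.

-- ===== PORT A =====
def sortDoubled (S : List Int) (L : Int) (order : List Int) (_class : List Int) : List Int :=
  let sLen : Int := S.length
  let count : List Int := List.replicate S.length 0
  let newOrder : List Int := List.replicate S.length 0
  let count := (PySem.List.pyRange 0 sLen 1).foldl
    (fun cnt i =>
      PySem.List.pySetD cnt (PySem.List.pyGetD _class i 0)
        (PySem.List.pyGetD cnt (PySem.List.pyGetD _class i 0) 0 + 1)) count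
  let count := (PySem.List.pyRange 1 sLen 1).foldl
    (fun cnt j =>
      PySem.List.pySetD cnt j
        (PySem.List.pyGetD cnt j 0 + PySem.List.pyGetD cnt (j - 1) 0)) count
  let st := (PySem.List.pyRange (sLen - 1) (-1) (-1)).foldl
    (fun (st : List Int × List Int) i =>
      let start := PySem.Int.mod (PySem.List.pyGetD order i 0 - L + sLen) sLen
      let cl := PySem.List.pyGetD _class start 0
      let cnt := PySem.List.pySetD st.1 cl (PySem.List.pyGetD st.1 cl 0 - 1)
      (cnt, PySem.List.pySetD st.2 (PySem.List.pyGetD cnt cl 0) start))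
    (count, newOrder)
  st.2

-- ===== PORT B =====
def sortDoubled_alt (S : List Int) (L : Int) (order : List Int) (_class : List Int) : List Int :=
  let n : Int := S.length
  let starts := (PySem.List.pyRange 0 n 1).map
    (fun i => PySem.Int.mod (PySem.List.pyGetD order i 0 - L + n) n)
  let hist := (PySem.List.pyRange 0 n 1).foldl
    (fun h i =>
      PySem.List.pySetD h (PySem.List.pyGetD _class i 0)
        (PySem.List.pyGetD h (PySem.List.pyGetD _class i 0) 0 + 1))
    (List.replicate S.length 0)
  let cum := (hist.foldl
    (fun (tc : Int × List Int) h => (tc.1 + h, tc.2 ++ [tc.1 + h])) ((0 : Int), ([] : List Int))).2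
  let buckets := (PySem.List.pyRange 0 n 1).foldl
    (fun bks i =>
      PySem.List.pySetD bks (PySem.List.pyGetD _class (PySem.List.pyGetD starts i 0) 0)
        (PySem.List.pyGetD bks (PySem.List.pyGetD _class (PySem.List.pyGetD starts i 0) 0) [] ++ [i]))
    ((PySem.List.pyRange 0 n 1).map (fun _ => ([] : List Int)))
  let pos := (PySem.List.pyRange 0 n 1).foldl
    (fun ps c =>
      ((PySem.List.pyGetD buckets c []).foldl
        (fun (st : Int × List Int) i => (st.1 + 1, PySem.List.pySetD st.2 i st.1))
        (PySem.List.pyGetD cum c 0 - ((PySem.List.pyGetD buckets c []).length : Int), ps)).2)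
    (List.replicate S.length 0)
  let result := (PySem.List.pyRange 0 n 1).reverse.foldl
    (fun res i =>
      PySem.List.pySetD res (PySem.List.pyGetD pos i 0) (PySem.List.pyGetD starts i 0))
    (List.replicate S.length 0)
  result

-- ===== PRECONDITION & SPEC =====
-- Pre_ is exactly where the Python A returns normally (no IndexError): order and
-- _class hold at least len(S) entries and every used class value lies in [-n, n).
def Pre_sortDoubled (S : List Int) (L : Int) (order : List Int) (_class : List Int) : Prop :=
  S.length ≤ order.length ∧
  S.length ≤ _class.length ∧
  (∀ c ∈ _class.take S.length, -(S.length : Int) ≤ c ∧ c < (S.length : Int))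
instance (S : List Int) (L : Int) (order : List Int) (_class : List Int) : Decidable (Pre_sortDoubled S L order _class) := by unfold Pre_sortDoubled; infer_instance

def pvWitness_sortDoubled : List Int × Int × List Int × List Int := ([5, 3], 1, [0, 1], [1, 0])

def Spec_sortDoubled (S : List Int) (L : Int) (order : List Int) (_class : List Int) (out : List Int) : Prop := out = sortDoubled_alt S L order _class
instance (S : List Int) (L : Int) (order : List Int) (_class : List Int) (out : List Int) : Decidable (Spec_sortDoubled S L order _class out) := by unfold Spec_sortDoubled; infer_instance

-- ===== CLAIM (what is proved, stated in full; the proofs are below) =====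
def Claim_equal_sortDoubled : Prop := ∀ (S : List Int) (L : Int) (order : List Int) (_class : List Int), Dom_sortDoubled S L order _class → Pre_sortDoubled S L order _class → Spec_sortDoubled S L order _class (sortDoubled S L order _class)

-- ===== LEMMAS AND PROOFS =====

theorem pv_take_succ (xs : List Int) (a : ℕ) (ha : a < xs.length) :
    xs.take (a+1) = xs.take a ++ [xs[a]] := by
  rw [List.take_add_one]
  simp [List.getElem?_eq_getElem ha]

-- Python indexing with a possibly negative in-range index is indexing at i mod len
theorem pv_pyGetD_wrap {α : Type} (xs : List α) (i : Int) (d : α)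
    (h0 : -(xs.length : Int) ≤ i) (h1 : i < (xs.length : Int)) (hn : 0 < xs.length) :
    PySem.List.pyGetD xs i d = xs.getD (PySem.Int.mod i (xs.length : Int)).toNat d := by
  rw [PySem.Int.mod_eq_emod_of_pos (by exact_mod_cast hn)]
  by_cases h : 0 ≤ i
  · rw [Int.emod_eq_of_lt h h1, PySem.List.pyGetD_of_nonneg _ _ h]
  · rw [Int.not_le] at h
    have hem : i % (xs.length : Int) = i + xs.length := by
      have h2 : (i + xs.length) % (xs.length : Int) = i % (xs.length : Int) := by
        conv_rhs => rw [show i = i + xs.length - xs.length * 1 from by ring]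
        rw [Int.sub_mul_emod_self_left]
      rw [← h2, Int.emod_eq_of_lt (by omega) (by omega)]
    rw [hem]
    simp only [PySem.List.pyGetD, PySem.List.pyGet?, PySem.List.pyIdx?]
    rw [if_neg (by omega), if_pos (by omega)]
    have : (xs.length - (-i).toNat) = (i + (xs.length:Int)).toNat := by omega
    rw [this]
    rfl

theorem pv_pySetD_wrap {α : Type} (xs : List α) (i : Int) (v : α)
    (h0 : -(xs.length : Int) ≤ i) (h1 : i < (xs.length : Int)) (hn : 0 < xs.length) :
    PySem.List.pySetD xs i v = xs.set (PySem.Int.mod i (xs.length : Int)).toNat v := by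
  rw [PySem.Int.mod_eq_emod_of_pos (by exact_mod_cast hn)]
  by_cases h : 0 ≤ i
  · rw [Int.emod_eq_of_lt h h1, PySem.List.pySetD_of_nonneg _ _ h]
  · rw [Int.not_le] at h
    have hem : i % (xs.length : Int) = i + xs.length := by
      have h2 : (i + xs.length) % (xs.length : Int) = i % (xs.length : Int) := by
        conv_rhs => rw [show i = i + xs.length - xs.length * 1 from by ring]
        rw [Int.sub_mul_emod_self_left]
      rw [← h2, Int.emod_eq_of_lt (by omega) (by omega)]
    rw [hem]
    simp only [PySem.List.pySetD, PySem.List.pySet?, PySem.List.pyIdx?]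
    rw [if_neg (by omega), if_pos (by omega)]
    have : (xs.length - (-i).toNat) = (i + (xs.length:Int)).toNat := by omega
    rw [this]
    rfl

-- A's histogram loop: cell c holds the number of already seen class values ≡ c (mod n)
theorem pv_stage1A (cls : List Int) (n : ℕ) (hn : 0 < n) (hlen : n ≤ cls.length)
    (hbnd : ∀ c ∈ cls.take n, -(n : Int) ≤ c ∧ c < (n : Int)) :
    ∀ m, m ≤ n →
    (PySem.List.pyRange 0 (m : Int) 1).foldl
      (fun cnt i => PySem.List.pySetD cnt (PySem.List.pyGetD cls i 0)
        (PySem.List.pyGetD cnt (PySem.List.pyGetD cls i 0) 0 + 1)) (List.replicate n 0)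
    = (List.range n).map (fun c : ℕ =>
        ((((cls.take m).map (fun x => PySem.Int.mod x (n : Int))).count ((c : ℕ) : Int) : ℕ) : Int)) := by
  intro m
  induction m with
  | zero =>
      intro _
      rw [PySem.List.pyRange_one_eq_nil (by omega)]
      apply List.ext_getElem
      · simp
      · intro i h1 h2
        simp
  | succ m ih =>
      intro hm
      have hmn : m < n := by omega
      have hmlen : m < cls.length := by omega
      have : ((m : ℕ) : Int) + 1 = (((m+1 : ℕ)) : Int) := by push_cast; ring
      rw [← this, PySem.List.pyRange_one_succ_right (by positivity), List.foldl_append,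
        ih (by omega)]
      simp only [List.foldl_cons, List.foldl_nil]
      have hget : PySem.List.pyGetD cls (m : Int) 0 = cls[m] :=
        PySem.List.pyGetD_eq_getElem cls 0 (by positivity) (by exact_mod_cast hmlen)
      have hcm : -(n : Int) ≤ cls[m] ∧ cls[m] < (n : Int) :=
        hbnd cls[m] (List.mem_take_iff_getElem.mpr ⟨m, by omega, rfl⟩)
      have hmod0 : (0:Int) ≤ PySem.Int.mod cls[m] (n : Int) :=
        PySem.Int.mod_nonneg _ (by exact_mod_cast hn)
      have hmod1 : PySem.Int.mod cls[m] (n : Int) < (n : Int) :=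
        PySem.Int.mod_lt _ (by exact_mod_cast hn)
      set v := (PySem.Int.mod cls[m] (n : Int)).toNat with hvdef
      have hvx : PySem.Int.mod cls[m] (n : Int) = (v : Int) := by omega
      have hvn : v < n := by omega
      have hLlen : ((List.range n).map (fun c : ℕ =>
          ((((cls.take m).map (fun x => PySem.Int.mod x (n : Int))).count ((c : ℕ) : Int) : ℕ) : Int))).length = n := by
        simp
      rw [hget, pv_pySetD_wrap _ _ _ (by rw [hLlen]; omega) (by rw [hLlen]; omega) (by omega),
        pv_pyGetD_wrap _ _ _ (by rw [hLlen]; omega) (by rw [hLlen]; omega) (by omega),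
        hLlen, hvx]
      rw [show ((v : Int)).toNat = v from by omega]
      rw [List.getD_eq_getElem _ _ (by simp; omega)]
      apply List.ext_getElem
      · simp
      · intro i h1 h2
        have hi : i < n := by simpa using h1
        rw [List.getElem_set]
        have htake : (cls.take (m+1)).map (fun x => PySem.Int.mod x (n : Int))
            = (cls.take m).map (fun x => PySem.Int.mod x (n : Int)) ++ [PySem.Int.mod cls[m] (n : Int)] := by
          rw [pv_take_succ cls m hmlen, List.map_append]
          rfl
        by_cases hiv : i = v
        · subst hiv
          rw [if_pos rfl]
          simp only [List.getElem_map, List.getElem_range, htake, List.count_append, hvx]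
          simp
        · rw [if_neg (by omega)]
          simp only [List.getElem_map, List.getElem_range, htake, List.count_append, hvx]
          have : ((v : ℕ) : Int) ≠ ((i : ℕ) : Int) := by omega
          simp [this]

-- A's prefix-sum loop
theorem pv_stage2 (n : ℕ) (h : ℕ → ℕ) :
    ∀ m, 1 ≤ m → m ≤ n →
    (PySem.List.pyRange 1 (m : Int) 1).foldl
      (fun cnt j => PySem.List.pySetD cnt j
        (PySem.List.pyGetD cnt j 0 + PySem.List.pyGetD cnt (j - 1) 0))
      ((List.range n).map (fun c : ℕ => ((h c : ℕ) : Int)))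
    = (List.range n).map (fun c : ℕ =>
        if c < m then ((((List.range (c+1)).map h).sum : ℕ) : Int) else ((h c : ℕ) : Int)) := by
  intro m
  induction m with
  | zero => omega
  | succ m ih =>
      intro _ hm
      by_cases hm1 : m = 0
      · subst hm1
        rw [show ((1 : ℕ) : Int) = 1 from rfl] at *
        rw [PySem.List.pyRange_one_eq_nil (by norm_num)]
        apply List.ext_getElem
        · simp
        · intro i h1 h2
          have hi : i < n := by simpa using h1
          simp only [List.foldl_nil, List.getElem_map, List.getElem_range]
          by_cases hi0 : i < 1
          · have : i = 0 := by omega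
            subst this
            simp
          · rw [if_neg hi0]
      · have hm1' : 1 ≤ m := by omega
        have hmn : m < n := by omega
        have : ((m : ℕ) : Int) + 1 = (((m+1 : ℕ)) : Int) := by push_cast; ring
        rw [← this, PySem.List.pyRange_one_succ_right (by exact_mod_cast hm1'), List.foldl_append,
          ih hm1' (by omega)]
        simp only [List.foldl_cons, List.foldl_nil]
        have hgm : PySem.List.pyGetD ((List.range n).map (fun c : ℕ =>
            if c < m then ((((List.range (c+1)).map h).sum : ℕ) : Int) else ((h c : ℕ) : Int))) (m : Int) 0
            = ((h m : ℕ) : Int) := by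
          rw [PySem.List.pyGetD_natCast, List.getD_eq_getElem _ _ (by simp; omega)]
          simp
        have hgm1 : PySem.List.pyGetD ((List.range n).map (fun c : ℕ =>
            if c < m then ((((List.range (c+1)).map h).sum : ℕ) : Int) else ((h c : ℕ) : Int))) ((m : Int) - 1) 0
            = ((((List.range (m-1+1)).map h).sum : ℕ) : Int) := by
          rw [show ((m : ℕ) : Int) - 1 = (((m-1 : ℕ)) : Int) from by push_cast [hm1']; ring,
            PySem.List.pyGetD_natCast, List.getD_eq_getElem _ _ (by simp; omega)]
          simp only [List.getElem_map, List.getElem_range]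
          rw [if_pos (by omega)]
        rw [hgm, hgm1, PySem.List.pySetD_of_nonneg _ _ (by positivity),
          show ((m : ℕ) : Int).toNat = m from by omega]
        apply List.ext_getElem
        · simp
        · intro i h1 h2
          have hi : i < n := by simpa using h1
          rw [List.getElem_set]
          by_cases him : i = m
          · subst him
            rw [if_pos rfl]
            simp only [List.getElem_map, List.getElem_range]
            rw [if_pos (by omega), show i-1+1 = i from by omega,
              List.range_succ, List.map_append, List.sum_append]
            push_cast
            ring_nf
            simp
            ring
          · rw [if_neg (by omega)]
            simp only [List.getElem_map, List.getElem_range]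
            by_cases hi2 : i < m
            · rw [if_pos hi2, if_pos (by omega)]
            · rw [if_neg hi2, if_neg (by omega)]

-- the scatter loop of A tracked against precomputed positions
def pvStarts (order : List Int) (L : Int) (n : ℕ) : List Int :=
  (PySem.List.pyRange 0 (n : Int) 1).map
    (fun i => PySem.Int.mod (PySem.List.pyGetD order i 0 - L + (n : Int)) (n : Int))
def pvKeys (cls order : List Int) (L : Int) (n : ℕ) : List Int :=
  (pvStarts order L n).map (fun s => PySem.Int.mod (PySem.List.pyGetD cls s 0) (n : Int))
def pvHist (cls : List Int) (n : ℕ) (c : ℕ) : ℕ :=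
  ((cls.take n).map (fun x => PySem.Int.mod x (n : Int))).count ((c : ℕ) : Int)
def pvCumF (cls : List Int) (n : ℕ) (c : ℕ) : ℕ := ((List.range (c+1)).map (pvHist cls n)).sum
def pvCum (cls : List Int) (n : ℕ) : List Int :=
  (List.range n).map (fun c : ℕ => ((pvCumF cls n c : ℕ) : Int))
def pvPos (cls order : List Int) (L : Int) (n : ℕ) : List Int :=
  (PySem.List.pyRange 0 (n : Int) 1).map
    (fun i => PySem.List.pyGetD (pvCum cls n) (PySem.List.pyGetD (pvKeys cls order L n) i 0) 0
      - ((PySem.List.slice (pvKeys cls order L n) (some i)).count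
          (PySem.List.pyGetD (pvKeys cls order L n) i 0) : Int))
def pvCN (cls order : List Int) (L : Int) (n : ℕ) (a : ℕ) : List Int :=
  (List.range n).map (fun c : ℕ =>
    ((pvCumF cls n c : ℕ) : Int) - ((((pvKeys cls order L n).drop a).count ((c : ℕ) : Int) : ℕ) : Int))

theorem pv_stage3_defs (cls order : List Int) (L : Int) (n : ℕ) (hn : 0 < n)
    (hlen : n ≤ cls.length) (hord : n ≤ order.length)
    (hbnd : ∀ c ∈ cls.take n, -(n : Int) ≤ c ∧ c < (n : Int)) :
    ∀ d a, a + d = n → ∀ X : List Int,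
    (PySem.List.pyRange (a : Int) (n : Int) 1).foldr
      (fun i (st : List Int × List Int) =>
        let start := PySem.Int.mod (PySem.List.pyGetD order i 0 - L + (n : Int)) (n : Int)
        let cl := PySem.List.pyGetD cls start 0
        let cnt := PySem.List.pySetD st.1 cl (PySem.List.pyGetD st.1 cl 0 - 1)
        (cnt, PySem.List.pySetD st.2 (PySem.List.pyGetD cnt cl 0) start))
      (pvCum cls n, X)
    = (pvCN cls order L n a,
       (PySem.List.pyRange (a : Int) (n : Int) 1).foldr
         (fun i (res : List Int) =>
           PySem.List.pySetD res (PySem.List.pyGetD (pvPos cls order L n) i 0)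
             (PySem.List.pyGetD (pvStarts order L n) i 0)) X) := by
  have hnz : (0:Int) < (n : Int) := by exact_mod_cast hn
  have hSlen : (pvStarts order L n).length = n := by
    rw [pvStarts, List.length_map, PySem.List.length_pyRange_one]; omega
  have hKlen : (pvKeys cls order L n).length = n := by
    rw [pvKeys, List.length_map, hSlen]
  intro d
  induction d with
  | zero =>
      intro a ha X
      have han : a = n := by omega
      subst han
      rw [PySem.List.pyRange_one_eq_nil (by omega)]
      simp only [List.foldr_nil]
      rw [Prod.mk.injEq]
      refine ⟨?_, rfl⟩
      rw [pvCN, pvCum]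
      apply List.map_congr_left
      intro c _
      rw [List.drop_of_length_le (by omega)]
      simp
  | succ m ih =>
      intro a ha X
      have han : a < n := by omega
      rw [PySem.List.pyRange_one_cons (by exact_mod_cast han), List.foldr_cons, List.foldr_cons,
        show ((a : Int) + 1) = (((a+1 : ℕ)) : Int) from by push_cast; ring,
        ih (a+1) (by omega) X]
      set s : Int := PySem.Int.mod (PySem.List.pyGetD order (a : Int) 0 - L + (n : Int)) (n : Int) with hsdef
      have hs0 : 0 ≤ s := PySem.Int.mod_nonneg _ hnz
      have hs1 : s < (n : Int) := PySem.Int.mod_lt _ hnz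
      have hSa : PySem.List.pyGetD (pvStarts order L n) (a : Int) 0 = s := by
        rw [pvStarts]
        exact PySem.List.pyGetD_map_pyRange_of_nonneg _ (n : Int) (a : Int) 0 (by omega) (by exact_mod_cast han)
      set cl : Int := PySem.List.pyGetD cls s 0 with hcldef
      have hclget : cl = cls[s.toNat]'(by omega) := by
        rw [hcldef]
        exact PySem.List.pyGetD_eq_getElem cls 0 hs0 (by omega)
      have hclb : -(n : Int) ≤ cl ∧ cl < (n : Int) := by
        rw [hclget]
        exact hbnd _ (List.mem_take_iff_getElem.mpr ⟨s.toNat, by omega, rfl⟩)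
      set kv : ℕ := (PySem.Int.mod cl (n : Int)).toNat with hkvdef
      have hmod0 : (0:Int) ≤ PySem.Int.mod cl (n : Int) := PySem.Int.mod_nonneg _ hnz
      have hmod1 : PySem.Int.mod cl (n : Int) < (n : Int) := PySem.Int.mod_lt _ hnz
      have hkv : PySem.Int.mod cl (n : Int) = (kv : Int) := by omega
      have hkvn : kv < n := by omega
      have hKa : PySem.List.pyGetD (pvKeys cls order L n) (a : Int) 0 = (kv : Int) := by
        rw [pvKeys, PySem.List.pyGetD_natCast,
          List.getD_eq_getElem _ _ (by rw [List.length_map, hSlen]; omega),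
          List.getElem_map]
        have hSg : (pvStarts order L n)[a]'(by omega) = s := by
          simp only [pvStarts, List.getElem_map, PySem.List.getElem_pyRange_one]
          rw [hsdef]
          norm_num
        rw [hSg, ← hcldef, hkv]
      have hdropa : (pvKeys cls order L n).drop a = (kv : Int) :: (pvKeys cls order L n).drop (a+1) := by
        have h1 : (pvKeys cls order L n).drop a
            = (pvKeys cls order L n)[a]'(by omega) :: (pvKeys cls order L n).drop (a+1) :=
          (List.getElem_cons_drop (by omega)).symm
        have h2 : (pvKeys cls order L n)[a]'(by omega) = (kv : Int) := by
          have h3 := hKa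
          rw [PySem.List.pyGetD_natCast, List.getD_eq_getElem _ _ (by omega)] at h3
          exact h3
        rw [h1, h2]
      have hcount : ∀ c : ℕ, ((pvKeys cls order L n).drop a).count ((c : ℕ) : Int)
          = ((pvKeys cls order L n).drop (a+1)).count ((c : ℕ) : Int) + (if c = kv then 1 else 0) := by
        intro c
        rw [hdropa, List.count_cons]
        by_cases hc : c = kv
        · subst hc; simp
        · have hne : ¬ ((kv : ℕ) : Int) = ((c : ℕ) : Int) := by omega
          simp [hne, hc]
      have hCNlen : ∀ t : ℕ, (pvCN cls order L n t).length = n := by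
        intro t; rw [pvCN]; simp
      have hread : ∀ t : ℕ, PySem.List.pyGetD (pvCN cls order L n t) cl 0
          = ((pvCumF cls n kv : ℕ) : Int) - ((((pvKeys cls order L n).drop t).count ((kv : ℕ) : Int) : ℕ) : Int) := by
        intro t
        rw [pv_pyGetD_wrap _ _ _ (by rw [hCNlen]; omega) (by rw [hCNlen]; omega) (by rw [hCNlen]; omega)]
        rw [hCNlen, hkv, show ((kv : Int)).toNat = kv from by omega]
        rw [List.getD_eq_getElem _ _ (by rw [hCNlen]; omega)]
        simp [pvCN]
      have hwrite : PySem.List.pySetD (pvCN cls order L n (a+1)) cl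
            (PySem.List.pyGetD (pvCN cls order L n (a+1)) cl 0 - 1)
          = pvCN cls order L n a := by
        rw [hread, pv_pySetD_wrap _ _ _ (by rw [hCNlen]; omega) (by rw [hCNlen]; omega) (by rw [hCNlen]; omega)]
        rw [hCNlen, hkv, show ((kv : Int)).toNat = kv from by omega]
        apply List.ext_getElem
        · rw [List.length_set, hCNlen, hCNlen]
        · intro i h1 h2
          have hi : i < n := by rw [List.length_set, hCNlen] at h1; omega
          rw [List.getElem_set]
          by_cases hik : i = kv
          · subst hik
            rw [if_pos rfl]
            simp only [pvCN, List.getElem_map, List.getElem_range]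
            rw [hcount kv, if_pos rfl]
            push_cast
            ring
          · rw [if_neg (by omega)]
            simp only [pvCN, List.getElem_map, List.getElem_range]
            rw [hcount i, if_neg (by omega)]
            simp
      have hPa : PySem.List.pyGetD (pvPos cls order L n) (a : Int) 0
          = ((pvCumF cls n kv : ℕ) : Int) - ((((pvKeys cls order L n).drop a).count ((kv : ℕ) : Int) : ℕ) : Int) := by
        rw [pvPos]
        rw [PySem.List.pyGetD_map_pyRange_of_nonneg _ (n : Int) (a : Int) 0 (by omega) (by exact_mod_cast han)]
        rw [hKa, PySem.List.slice_from (pvKeys cls order L n) (by omega : (0:Int) ≤ (a : Int))]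
        rw [show ((a : Int)).toNat = a from by omega]
        congr 1
        rw [pvCum, PySem.List.pyGetD_natCast, List.getD_eq_getElem _ _ (by simp; omega)]
        simp
      show (PySem.List.pySetD (pvCN cls order L n (a+1)) cl
              (PySem.List.pyGetD (pvCN cls order L n (a+1)) cl 0 - 1),
            PySem.List.pySetD
              ((PySem.List.pyRange ((a+1 : ℕ) : Int) (n : Int) 1).foldr
                (fun i (res : List Int) =>
                  PySem.List.pySetD res (PySem.List.pyGetD (pvPos cls order L n) i 0)
                    (PySem.List.pyGetD (pvStarts order L n) i 0)) X)
              (PySem.List.pyGetD (PySem.List.pySetD (pvCN cls order L n (a+1)) cl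
                (PySem.List.pyGetD (pvCN cls order L n (a+1)) cl 0 - 1)) cl 0) s)
          = (pvCN cls order L n a,
             PySem.List.pySetD
              ((PySem.List.pyRange ((a+1 : ℕ) : Int) (n : Int) 1).foldr
                (fun i (res : List Int) =>
                  PySem.List.pySetD res (PySem.List.pyGetD (pvPos cls order L n) i 0)
                    (PySem.List.pyGetD (pvStarts order L n) i 0)) X)
              (PySem.List.pyGetD (pvPos cls order L n) (a : Int) 0)
              (PySem.List.pyGetD (pvStarts order L n) (a : Int) 0))
      rw [hwrite, hread a, hPa, hSa]

theorem pv_stage3 (cls order : List Int) (L : Int) (n : ℕ) (hn : 0 < n)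
    (hlen : n ≤ cls.length) (hord : n ≤ order.length)
    (hbnd : ∀ c ∈ cls.take n, -(n : Int) ≤ c ∧ c < (n : Int)) :
    ∀ d a, a + d = n → ∀ X : List Int,
    (PySem.List.pyRange (a : Int) (n : Int) 1).foldr
      (fun i (st : List Int × List Int) =>
        let start := PySem.Int.mod (PySem.List.pyGetD order i 0 - L + (n : Int)) (n : Int)
        let cl := PySem.List.pyGetD cls start 0
        let cnt := PySem.List.pySetD st.1 cl (PySem.List.pyGetD st.1 cl 0 - 1)
        (cnt, PySem.List.pySetD st.2 (PySem.List.pyGetD cnt cl 0) start))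
      ((List.range n).map (fun c : ℕ =>
        ((((List.range (c+1)).map (fun c : ℕ =>
          ((cls.take n).map (fun x => PySem.Int.mod x (n : Int))).count ((c : ℕ) : Int))).sum : ℕ) : Int)), X)
    = ((List.range n).map (fun c : ℕ =>
        ((((List.range (c+1)).map (fun c : ℕ =>
          ((cls.take n).map (fun x => PySem.Int.mod x (n : Int))).count ((c : ℕ) : Int))).sum : ℕ) : Int)
        - (((pvKeys cls order L n).drop a).count ((c : ℕ) : Int) : ℕ)),
       (PySem.List.pyRange (a : Int) (n : Int) 1).foldr
         (fun i (res : List Int) =>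
           PySem.List.pySetD res (PySem.List.pyGetD (pvPos cls order L n) i 0)
             (PySem.List.pyGetD (pvStarts order L n) i 0)) X) :=
  pv_stage3_defs cls order L n hn hlen hord hbnd

-- ===== bucket-sort side: start positions, class keys, slot positions =====
def pvStf (order : List Int) (L : Int) (n : ℕ) (i : ℕ) : Int :=
  PySem.Int.mod (PySem.List.pyGetD order (i : Int) 0 - L + (n : Int)) (n : Int)
def pvKf (cls order : List Int) (L : Int) (n : ℕ) (i : ℕ) : ℕ :=
  (PySem.Int.mod (PySem.List.pyGetD cls (pvStf order L n i) 0) (n : Int)).toNat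
def pvKL (cls order : List Int) (L : Int) (n : ℕ) : List ℕ :=
  (List.range n).map (pvKf cls order L n)
def pvHK (cls order : List Int) (L : Int) (n : ℕ) (c : ℕ) : ℕ := (pvKL cls order L n).count c
def pvPrefC (cls order : List Int) (L : Int) (n : ℕ) (i : ℕ) : ℕ :=
  ((List.range i).map (pvKf cls order L n)).count (pvKf cls order L n i)
def pvSuffC (cls order : List Int) (L : Int) (n : ℕ) (i : ℕ) : ℕ :=
  ((pvKL cls order L n).drop i).count (pvKf cls order L n i)
-- the slot position of index i: cumulative count of its class minus its suffix rank
def pvE (cls order : List Int) (L : Int) (n : ℕ) (i : ℕ) : Int :=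
  ((pvCumF cls n (pvKf cls order L n i) : ℕ) : Int) - ((pvSuffC cls order L n i : ℕ) : Int)

theorem pv_count_map_nat {α : Type} (l : List α) (f : α → ℕ) (c : ℕ) :
    (l.map f).count c = (l.filter (fun x => f x = c)).length := by
  rw [List.count_eq_countP, List.countP_map, List.countP_eq_length_filter]
  congr 1

theorem pv_count_cast (l : List ℕ) (c : ℕ) :
    (l.map (fun x => ((x : ℕ) : Int))).count ((c : ℕ) : Int) = l.count c := by
  rw [List.count_eq_countP, List.countP_map, List.count_eq_countP]
  apply List.countP_congr
  intro x _
  simp [Function.comp]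

theorem pv_stf_bounds (order : List Int) (L : Int) (n : ℕ) (hn : 0 < n) (i : ℕ) :
    0 ≤ pvStf order L n i ∧ pvStf order L n i < (n : Int) :=
  ⟨PySem.Int.mod_nonneg _ (by exact_mod_cast hn), PySem.Int.mod_lt _ (by exact_mod_cast hn)⟩

theorem pv_kf_lt (cls order : List Int) (L : Int) (n : ℕ) (hn : 0 < n) (i : ℕ) :
    pvKf cls order L n i < n := by
  have h0 := PySem.Int.mod_nonneg (PySem.List.pyGetD cls (pvStf order L n i) 0)
    (by exact_mod_cast hn : (0:Int) < (n:Int))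
  have h1 := PySem.Int.mod_lt (PySem.List.pyGetD cls (pvStf order L n i) 0)
    (by exact_mod_cast hn : (0:Int) < (n:Int))
  unfold pvKf
  omega

theorem pv_keys_eq (cls order : List Int) (L : Int) (n : ℕ) (hn : 0 < n) :
    pvKeys cls order L n = (List.range n).map (fun i => ((pvKf cls order L n i : ℕ) : Int)) := by
  rw [pvKeys, pvStarts, PySem.List.pyRange_one]
  simp only [List.map_map]
  have hn' : ((n : Int) - 0).toNat = n := by omega
  rw [hn']
  apply List.map_congr_left
  intro k _
  have h0 : (0:Int) ≤ PySem.Int.mod (PySem.List.pyGetD cls (pvStf order L n k) 0) (n : Int) :=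
    PySem.Int.mod_nonneg _ (by exact_mod_cast hn)
  simp only [Function.comp_apply, pvKf]
  rw [Int.toNat_of_nonneg h0]
  simp [pvStf]

theorem pv_pref_suff (cls order : List Int) (L : Int) (n : ℕ) (i : ℕ) (hi : i < n) :
    pvPrefC cls order L n i + pvSuffC cls order L n i = pvHK cls order L n (pvKf cls order L n i) := by
  have hsplit : List.range n = List.range i ++ (List.range (n - i)).map (i + ·) := by
    rw [← List.range_add]
    congr 1
    omega
  have hdrop : (pvKL cls order L n).drop i
      = ((List.range (n - i)).map (i + ·)).map (pvKf cls order L n) := by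
    rw [pvKL, hsplit, List.map_append]
    exact List.drop_left' (by simp)
  rw [pvHK, pvKL, hsplit, List.map_append, List.count_append, pvPrefC, pvSuffC, hdrop]

theorem pv_starts_entry (order : List Int) (L : Int) (n : ℕ) (i : ℕ) (hi : i < n) :
    PySem.List.pyGetD (pvStarts order L n) (i : Int) 0 = pvStf order L n i := by
  rw [pvStarts]
  exact PySem.List.pyGetD_map_pyRange_of_nonneg _ (n : Int) (i : Int) 0 (by omega) (by exact_mod_cast hi)

-- B's running-sum loop over the histogram list
theorem pv_cumsum (g : ℕ → ℕ) : ∀ m : ℕ,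
    (((List.range m).map (fun c => ((g c : ℕ) : Int))).foldl
      (fun (tc : Int × List Int) h => (tc.1 + h, tc.2 ++ [tc.1 + h])) ((0 : Int), ([] : List Int)))
    = (((((List.range m).map g).sum : ℕ) : Int),
       (List.range m).map (fun c : ℕ => ((((List.range (c+1)).map g).sum : ℕ) : Int))) := by
  intro m
  induction m with
  | zero => simp
  | succ m ih =>
      rw [List.range_succ, List.map_append, List.foldl_append, ih]
      simp only [List.map_cons, List.map_nil, List.foldl_cons, List.foldl_nil]
      rw [Prod.mk.injEq]
      constructor
      · rw [List.map_append, List.sum_append]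
        push_cast
        simp
      · rw [List.map_append]
        congr 1
        simp only [List.map_cons, List.map_nil]
        rw [List.range_succ, List.map_append, List.sum_append]
        push_cast
        simp

-- B's bucket loop collects the indices of each class in ascending order
theorem pv_bloop (cls order : List Int) (L : Int) (n : ℕ) (hn : 0 < n)
    (hlen : n ≤ cls.length)
    (hbnd : ∀ c ∈ cls.take n, -(n : Int) ≤ c ∧ c < (n : Int)) :
    ∀ m, m ≤ n →
    (PySem.List.pyRange 0 (m : Int) 1).foldl
      (fun bks i =>
        PySem.List.pySetD bks
          (PySem.List.pyGetD cls (PySem.List.pyGetD (pvStarts order L n) i 0) 0)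
          (PySem.List.pyGetD bks
            (PySem.List.pyGetD cls (PySem.List.pyGetD (pvStarts order L n) i 0) 0) [] ++ [i]))
      ((PySem.List.pyRange 0 (n : Int) 1).map (fun _ => ([] : List Int)))
    = (List.range n).map (fun c =>
        ((List.range m).filter (fun i => pvKf cls order L n i = c)).map (fun i : ℕ => (i : Int))) := by
  have hnz : (0:Int) < (n:Int) := by exact_mod_cast hn
  intro m
  induction m with
  | zero =>
      intro _
      have h0 : PySem.List.pyRange 0 (((0:ℕ)) : Int) 1 = [] :=
        PySem.List.pyRange_one_eq_nil (by norm_num)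
      rw [h0]
      simp only [List.foldl_nil]
      rw [PySem.List.pyRange_one, show ((n : Int) - 0).toNat = n from by omega, List.map_map]
      apply List.map_congr_left
      intro k _
      simp
  | succ m ih =>
      intro hm
      have hmn : m < n := by omega
      rw [show (((m+1 : ℕ)) : Int) = ((m : ℕ) : Int) + 1 from by push_cast; ring,
        PySem.List.pyRange_one_succ_right (by positivity), List.foldl_append, ih (by omega)]
      simp only [List.foldl_cons, List.foldl_nil]
      rw [pv_starts_entry order L n m hmn]
      have hs0 : 0 ≤ pvStf order L n m := (pv_stf_bounds order L n hn m).1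
      have hs1 : pvStf order L n m < (n : Int) := (pv_stf_bounds order L n hn m).2
      set cl : Int := PySem.List.pyGetD cls (pvStf order L n m) 0 with hcldef
      have hclget : cl = cls[(pvStf order L n m).toNat]'(by omega) :=
        PySem.List.pyGetD_eq_getElem cls 0 hs0 (by omega)
      have hclb : -(n : Int) ≤ cl ∧ cl < (n : Int) := by
        rw [hclget]
        exact hbnd _ (List.mem_take_iff_getElem.mpr ⟨(pvStf order L n m).toNat, by omega, rfl⟩)
      have hmod0 : (0:Int) ≤ PySem.Int.mod cl (n : Int) := PySem.Int.mod_nonneg _ hnz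
      have hkv : PySem.Int.mod cl (n : Int) = ((pvKf cls order L n m : ℕ) : Int) := by
        rw [pvKf, ← hcldef, Int.toNat_of_nonneg hmod0]
      have hkvn : pvKf cls order L n m < n := pv_kf_lt cls order L n hn m
      have hacclen : ((List.range n).map (fun c =>
          ((List.range m).filter (fun i => pvKf cls order L n i = c)).map (fun i : ℕ => (i : Int)))).length = n := by
        simp
      rw [pv_pySetD_wrap _ _ _ (by rw [hacclen]; omega) (by rw [hacclen]; omega) (by rw [hacclen]; omega),
        pv_pyGetD_wrap _ _ _ (by rw [hacclen]; omega) (by rw [hacclen]; omega) (by rw [hacclen]; omega),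
        hacclen, hkv, show (((pvKf cls order L n m : ℕ) : Int)).toNat = pvKf cls order L n m from by omega]
      rw [List.getD_eq_getElem _ _ (by simpa using hkvn)]
      apply List.ext_getElem
      · simp
      · intro c h1 h2
        have hc : c < n := by simpa using h1
        rw [List.getElem_set]
        simp only [List.getElem_map, List.getElem_range]
        have hfsplit : (List.range (m+1)).filter (fun i => pvKf cls order L n i = c)
            = (List.range m).filter (fun i => pvKf cls order L n i = c)
              ++ List.filter (fun i => decide (pvKf cls order L n i = c)) [m] := by
          rw [List.range_succ, List.filter_append]
        by_cases hck : pvKf cls order L n m = c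
        · rw [if_pos hck, hfsplit, List.filter_cons, if_pos (by simpa using hck), List.filter_nil,
            List.map_append, hck]
          simp
        · rw [if_neg hck, hfsplit, List.filter_cons, if_neg (by simpa using hck), List.filter_nil]
          simp

-- filling one bucket's slot range: consecutive positions for its members
theorem pv_fill : ∀ (js : List ℕ) (p0 : Int) (lst : List Int), js.Nodup → (∀ j ∈ js, j < lst.length) →
    (((js.map (fun j : ℕ => (j : Int))).foldl
        (fun (st : Int × List Int) i => (st.1 + 1, PySem.List.pySetD st.2 i st.1)) (p0, lst)).2.length
      = lst.length)
    ∧ (∀ k : ℕ, k ∉ js →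
        ((js.map (fun j : ℕ => (j : Int))).foldl
          (fun (st : Int × List Int) i => (st.1 + 1, PySem.List.pySetD st.2 i st.1)) (p0, lst)).2[k]?
        = lst[k]?)
    ∧ (∀ r j : ℕ, js[r]? = some j →
        ((js.map (fun j : ℕ => (j : Int))).foldl
          (fun (st : Int × List Int) i => (st.1 + 1, PySem.List.pySetD st.2 i st.1)) (p0, lst)).2[j]?
        = some (p0 + r)) := by
  intro js
  induction js with
  | nil =>
      intro p0 lst _ _
      refine ⟨rfl, fun k _ => rfl, fun r j hrj => by simp at hrj⟩
  | cons a t ih =>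
      intro p0 lst hnd hb
      have ha : a < lst.length := hb a List.mem_cons_self
      simp only [List.map_cons, List.foldl_cons, PySem.List.pySetD_natCast]
      have hb' : ∀ j ∈ t, j < (lst.set a p0).length := by
        intro j hj
        rw [List.length_set]
        exact hb j (List.mem_cons_of_mem a hj)
      obtain ⟨hlen', hmiss, hhit⟩ := ih (p0 + 1) (lst.set a p0) (List.Nodup.of_cons hnd) hb'
      have hanott : a ∉ t := (List.nodup_cons.mp hnd).1
      refine ⟨by rw [hlen', List.length_set], ?_, ?_⟩
      · intro k hk
        have hka : a ≠ k := fun he => hk (he ▸ List.mem_cons_self)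
        rw [hmiss k (fun hkt => hk (List.mem_cons_of_mem a hkt)),
          List.getElem?_set_ne hka]
      · intro r j hrj
        cases r with
        | zero =>
            have hja : a = j := by simpa using hrj
            subst hja
            rw [hmiss a hanott, List.getElem?_set_self ha]
            simp
        | succ r =>
            have hrj' : t[r]? = some j := by simpa using hrj
            rw [hhit r j hrj']
            congr 1
            push_cast
            ring

-- B's position loop, cell by cell
theorem pv_posloop_defs (cls order : List Int) (L : Int) (n : ℕ) (_hn : 0 < n)
    (_hlen : n ≤ cls.length) :
    ∀ m, m ≤ n →
    (PySem.List.pyRange 0 (m : Int) 1).foldl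
      (fun ps c =>
        ((PySem.List.pyGetD ((List.range n).map (fun c =>
            ((List.range n).filter (fun i => pvKf cls order L n i = c)).map (fun i : ℕ => (i : Int)))) c []).foldl
          (fun (st : Int × List Int) i => (st.1 + 1, PySem.List.pySetD st.2 i st.1))
          (PySem.List.pyGetD (pvCum cls n) c 0
            - ((PySem.List.pyGetD ((List.range n).map (fun c =>
                ((List.range n).filter (fun i => pvKf cls order L n i = c)).map (fun i : ℕ => (i : Int)))) c []).length : Int),
           ps)).2)
      (List.replicate n 0)
    = (List.range n).map (fun i => if pvKf cls order L n i < m then pvE cls order L n i else 0) := by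
  intro m
  induction m with
  | zero =>
      intro _
      have h0 : PySem.List.pyRange 0 (((0:ℕ)) : Int) 1 = [] :=
        PySem.List.pyRange_one_eq_nil (by norm_num)
      rw [h0]
      simp only [List.foldl_nil]
      apply List.ext_getElem
      · simp
      · intro k h1 h2
        simp
  | succ m ih =>
      intro hm
      have hmn : m < n := by omega
      rw [show (((m+1 : ℕ)) : Int) = ((m : ℕ) : Int) + 1 from by push_cast; ring,
        PySem.List.pyRange_one_succ_right (by positivity), List.foldl_append, ih (by omega)]
      simp only [List.foldl_cons, List.foldl_nil]
      have hB : PySem.List.pyGetD ((List.range n).map (fun c =>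
          ((List.range n).filter (fun i => pvKf cls order L n i = c)).map (fun i : ℕ => (i : Int)))) ((m:ℕ) : Int) []
          = ((List.range n).filter (fun i => pvKf cls order L n i = m)).map (fun i : ℕ => (i : Int)) := by
        rw [PySem.List.pyGetD_natCast, List.getD_eq_getElem _ _ (by simpa using hmn), List.getElem_map,
          List.getElem_range]
      have hC : PySem.List.pyGetD (pvCum cls n) ((m:ℕ) : Int) 0 = ((pvCumF cls n m : ℕ) : Int) := by
        rw [pvCum, PySem.List.pyGetD_natCast, List.getD_eq_getElem _ _ (by simpa using hmn),
          List.getElem_map, List.getElem_range]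
      rw [hB, hC]
      have hmaplen : ((((List.range n).filter (fun i => pvKf cls order L n i = m)).map
          (fun i : ℕ => (i : Int))).length : Int)
          = (((List.range n).filter (fun i => pvKf cls order L n i = m)).length : Int) := by
        simp
      rw [hmaplen]
      have hJnd : ((List.range n).filter (fun i => pvKf cls order L n i = m)).Nodup :=
        List.Nodup.filter _ List.nodup_range
      have hacclen : ((List.range n).map
          (fun i => if pvKf cls order L n i < m then pvE cls order L n i else 0)).length = n := by
        simp
      have hJb : ∀ j ∈ (List.range n).filter (fun i => pvKf cls order L n i = m),
          j < ((List.range n).map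
            (fun i => if pvKf cls order L n i < m then pvE cls order L n i else 0)).length := by
        intro j hj
        rw [hacclen]
        simpa using (List.mem_filter.mp hj).1
      obtain ⟨hlenR, hmiss, hhit⟩ := pv_fill ((List.range n).filter (fun i => pvKf cls order L n i = m))
        (((pvCumF cls n m : ℕ) : Int) - ((((List.range n).filter (fun i => pvKf cls order L n i = m)).length : ℕ) : Int))
        ((List.range n).map (fun i => if pvKf cls order L n i < m then pvE cls order L n i else 0))
        hJnd hJb
      apply List.ext_getElem?_iff.mpr
      intro q
      rcases Nat.lt_or_ge q n with hq | hq
      · by_cases hkq : pvKf cls order L n q = m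
        · have hsplit : List.range n = List.range q ++ (List.range (n - q)).map (q + ·) := by
            rw [← List.range_add]; congr 1; omega
          have hs2 : (List.range (n - q)).map (q + ·)
              = q :: (List.range (n - q - 1)).map (fun k => q + (k + 1)) := by
            have h1 : n - q = (n - q - 1) + 1 := by omega
            rw [h1, List.range_succ_eq_map, List.map_cons, List.map_map]
            rfl
          have hbsplit : (List.range n).filter (fun i => pvKf cls order L n i = m)
              = (List.range q).filter (fun i => pvKf cls order L n i = m)
                ++ q :: ((List.range (n - q - 1)).map (fun k => q + (k + 1))).filter
                    (fun i => pvKf cls order L n i = m) := by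
            rw [hsplit, List.filter_append, hs2, List.filter_cons, if_pos (by simpa using hkq)]
          have hr : ((List.range n).filter (fun i => pvKf cls order L n i = m))[((List.range q).filter (fun i => pvKf cls order L n i = m)).length]?
              = some q := by
            rw [hbsplit, List.getElem?_append_right (le_refl _), Nat.sub_self]
            rfl
          rw [hhit _ q hr, List.getElem?_map, List.getElem?_range hq]
          simp only [Option.map_some]
          rw [if_pos (by omega)]
          congr 1
          have h1 : pvPrefC cls order L n q
              = ((List.range q).filter (fun i => pvKf cls order L n i = m)).length := by
            rw [pvPrefC, hkq, pv_count_map_nat]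
          have h2 : ((List.range n).filter (fun i => pvKf cls order L n i = m)).length
              = pvHK cls order L n m := by
            rw [pvHK, pvKL, pv_count_map_nat]
          have h3 := pv_pref_suff cls order L n q hq
          rw [hkq] at h3
          rw [pvE, hkq, ← h1]
          omega
        · have hnotin : q ∉ (List.range n).filter (fun i => pvKf cls order L n i = m) := by
            intro hqin
            exact hkq (by simpa using (List.mem_filter.mp hqin).2)
          rw [hmiss q hnotin, List.getElem?_map, List.getElem?_map, List.getElem?_range hq]
          simp only [Option.map_some]
          congr 1
          by_cases h : pvKf cls order L n q < m
          · rw [if_pos h, if_pos (by omega)]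
          · rw [if_neg h, if_neg (by omega)]
      · rw [List.getElem?_eq_none_iff.mpr (by rw [hlenR, hacclen]; omega),
          List.getElem?_eq_none_iff.mpr (by simp; omega)]

theorem pv_posloop (cls order : List Int) (L : Int) (n : ℕ) (hn : 0 < n)
    (hlen : n ≤ cls.length) :
    ∀ m, m ≤ n →
    (PySem.List.pyRange 0 (m : Int) 1).foldl
      (fun ps c =>
        ((PySem.List.pyGetD ((List.range n).map (fun c =>
            ((List.range n).filter (fun i => pvKf cls order L n i = c)).map (fun i : ℕ => (i : Int)))) c []).foldl
          (fun (st : Int × List Int) i => (st.1 + 1, PySem.List.pySetD st.2 i st.1))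
          (PySem.List.pyGetD ((List.range n).map (fun c : ℕ =>
              ((((List.range (c+1)).map (fun c : ℕ =>
                ((cls.take n).map (fun x => PySem.Int.mod x (n : Int))).count ((c : ℕ) : Int))).sum : ℕ) : Int))) c 0
            - ((PySem.List.pyGetD ((List.range n).map (fun c =>
                ((List.range n).filter (fun i => pvKf cls order L n i = c)).map (fun i : ℕ => (i : Int)))) c []).length : Int),
           ps)).2)
      (List.replicate n 0)
    = (List.range n).map (fun i => if pvKf cls order L n i < m then pvE cls order L n i else 0) :=
  pv_posloop_defs cls order L n hn hlen

-- the precomputed slot positions are exactly A's scatter positions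
theorem pv_poslist (cls order : List Int) (L : Int) (n : ℕ) (hn : 0 < n) :
    pvPos cls order L n = (List.range n).map (pvE cls order L n) := by
  rw [pvPos, PySem.List.pyRange_one, show ((n : Int) - 0).toNat = n from by omega, List.map_map]
  apply List.map_congr_left
  intro k hk
  have hk' : k < n := List.mem_range.mp hk
  simp only [Function.comp_apply]
  rw [show (0 : Int) + ((k : ℕ) : Int) = ((k : ℕ) : Int) from by simp]
  have hKa : PySem.List.pyGetD (pvKeys cls order L n) ((k : ℕ) : Int) 0
      = ((pvKf cls order L n k : ℕ) : Int) := by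
    rw [pv_keys_eq cls order L n hn, PySem.List.pyGetD_natCast,
      List.getD_eq_getElem _ _ (by simpa using hk'), List.getElem_map]
    simp
  rw [hKa]
  have hC : PySem.List.pyGetD (pvCum cls n) ((pvKf cls order L n k : ℕ) : Int) 0
      = ((pvCumF cls n (pvKf cls order L n k) : ℕ) : Int) := by
    rw [pvCum, PySem.List.pyGetD_natCast,
      List.getD_eq_getElem _ _ (by simpa using pv_kf_lt cls order L n hn k), List.getElem_map]
    simp
  rw [hC, PySem.List.slice_from _ (by omega : (0:Int) ≤ ((k : ℕ) : Int)),
    show (((k : ℕ) : Int)).toNat = k from by omega]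
  have hcount : ((pvKeys cls order L n).drop k).count ((pvKf cls order L n k : ℕ) : Int)
      = pvSuffC cls order L n k := by
    rw [pv_keys_eq cls order L n hn,
      show (List.range n).map (fun j => ((pvKf cls order L n j : ℕ) : Int))
        = ((List.range n).map (pvKf cls order L n)).map (fun x : ℕ => ((x : ℕ) : Int)) from by
          rw [List.map_map]; rfl,
      ← List.map_drop, pv_count_cast]
    rfl
  rw [hcount]
  rfl

theorem pv_posfinal (cls order : List Int) (L : Int) (n : ℕ) (hn : 0 < n) :
    (List.range n).map (fun i => if pvKf cls order L n i < n then pvE cls order L n i else 0)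
    = pvPos cls order L n := by
  rw [pv_poslist cls order L n hn]
  apply List.map_congr_left
  intro i _
  rw [if_pos (pv_kf_lt cls order L n hn i)]

-- ===== VERDICT (by name: the statement is the Claim_ definition above) =====
theorem sortDoubled_spec : Claim_equal_sortDoubled := by
  intro S L order cls hdom hpre
  obtain ⟨hord, hlen, hbnd⟩ := hpre
  unfold Spec_sortDoubled sortDoubled sortDoubled_alt
  by_cases hn0 : S.length = 0
  · rw [hn0]
    norm_num [PySem.List.pyRange_one_eq_nil, PySem.List.pyRange_neg_one_eq_nil]
  have hn1 : 1 ≤ S.length := by omega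
  dsimp only
  rw [show ((PySem.List.pyRange 0 ((S.length : ℕ) : Int) 1).map
      (fun i => PySem.Int.mod (PySem.List.pyGetD order i 0 - L + ((S.length : ℕ) : Int))
        ((S.length : ℕ) : Int)))
      = pvStarts order L S.length from rfl]
  rw [pv_stage1A cls S.length (by omega) hlen hbnd S.length le_rfl]
  rw [pv_cumsum (fun c : ℕ =>
      ((cls.take S.length).map (fun x => PySem.Int.mod x ((S.length : ℕ) : Int))).count ((c : ℕ) : Int))
      S.length]
  dsimp only
  rw [pv_stage2 S.length (fun c : ℕ =>
      ((cls.take S.length).map (fun x => PySem.Int.mod x (S.length : Int))).count ((c : ℕ) : Int))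
      S.length hn1 le_rfl]
  have hifmap : (List.range S.length).map (fun c : ℕ =>
      if c < S.length then ((((List.range (c+1)).map (fun c : ℕ =>
        ((cls.take S.length).map (fun x => PySem.Int.mod x (S.length : Int))).count ((c : ℕ) : Int))).sum : ℕ) : Int)
      else ((((cls.take S.length).map (fun x => PySem.Int.mod x (S.length : Int))).count ((c : ℕ) : Int) : ℕ) : Int))
      = (List.range S.length).map (fun c : ℕ =>
        ((((List.range (c+1)).map (fun c : ℕ =>
        ((cls.take S.length).map (fun x => PySem.Int.mod x (S.length : Int))).count ((c : ℕ) : Int))).sum : ℕ) : Int)) := by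
    apply List.map_congr_left
    intro c hc
    simp only [List.mem_range] at hc
    rw [if_pos hc]
  rw [hifmap]
  rw [pv_bloop cls order L S.length (by omega) hlen hbnd S.length le_rfl]
  rw [pv_posloop cls order L S.length (by omega) hlen S.length le_rfl]
  rw [pv_posfinal cls order L S.length (by omega)]
  have hrev : PySem.List.pyRange ((S.length : Int) - 1) (-1) (-1)
      = (PySem.List.pyRange 0 (S.length : Int) 1).reverse := by
    rw [PySem.List.pyRange_neg_one_eq_reverse]
    norm_num
  rw [hrev, List.foldl_reverse, List.foldl_reverse]
  have hfin := pv_stage3 cls order L S.length (by omega) hlen hord hbnd S.length 0 (by omega)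
    (List.replicate S.length 0)
  simp only [Nat.cast_zero] at hfin
  exact congrArg Prod.snd hfin
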